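-- pv_equiv track=rewrite | github.com/bineeshpc/problemsolving | utils/detox.py | replace_all_dots_except_extension
-- ===== SOURCE A (Python) =====
-- def replace_all_dots_except_extension(str1):
--     """
--     Suppose the filename is
--     a.b.c.d.txt
--     Replace all dots except the last dot with hyphen
--     this function returns
--     a-b-c-d.txt
--     """
--     num_indices_to_replace = -1 # initialize to -1 because I dont want
--     # to count the last dot
--     for i in range(len(str1)):
--         if str1[i] == '.':
--             num_indices_to_replace += 1
--     new_str_list = []
--
--     count = 0
--     i = 0
--     while i < len(str1):
--         if str1[i] == '.' and count < num_indices_to_replace: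
--             count += 1
--             new_str_list.append('-')
--         else:
--             new_str_list.append(str1[i])
--         i += 1
--     return ''.join(new_str_list)
-- ===== SOURCE B (Python) =====
-- def replace_all_dots_except_extension(str1):
--     out = []
--     seen_last_dot = False
--     for ch in reversed(str1):
--         if ch == '.' and seen_last_dot:
--             out.append('-')
--         else:
--             out.append(ch)
--             if ch == '.':
--                 seen_last_dot = True
--     return ''.join(reversed(out))
-- ===== Notes on version B (the rewrite author's own statement) =====
-- stated objective: simpler
-- what changed: A makes two passes (a counting pass to find the number of dots minus one, then an index-driven while loop with an int counter deciding each replacement); B makes a single pass over the reversed string with a boolean flag recording whether the final dot has been passed, replacing every dot once the flag is set, then reverses the output.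
import Mathlib
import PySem

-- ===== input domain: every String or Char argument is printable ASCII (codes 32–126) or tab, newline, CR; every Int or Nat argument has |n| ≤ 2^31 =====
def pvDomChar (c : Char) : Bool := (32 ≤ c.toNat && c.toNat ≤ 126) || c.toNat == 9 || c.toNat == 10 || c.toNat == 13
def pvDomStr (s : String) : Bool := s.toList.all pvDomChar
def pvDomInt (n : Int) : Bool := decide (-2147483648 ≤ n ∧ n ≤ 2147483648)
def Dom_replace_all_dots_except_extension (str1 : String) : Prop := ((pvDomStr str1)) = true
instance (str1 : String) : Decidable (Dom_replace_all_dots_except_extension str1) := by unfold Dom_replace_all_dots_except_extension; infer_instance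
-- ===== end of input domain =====

-- B replaces A's two passes (dot count, then a counted index loop) by a single reverse
-- pass with a 'seen the last dot' flag; objective: simpler, same cost.

-- ===== PORT A =====
-- counting pass: num_indices_to_replace, then the while loop building new_str_list
def pvAcnt (n : Int) (c : Char) : Int := if c = '.' then n + 1 else n

def pvAstep (num : Int) (st : Int × List Char) (c : Char) : Int × List Char :=
  if c = '.' ∧ st.1 < num then (st.1 + 1, st.2 ++ ['-']) else (st.1, st.2 ++ [c])

def replace_all_dots_except_extension (str1 : String) : String :=
  let s := str1.toList
  let num : Int :=
    (PySem.List.pyRange 0 (PySem.Str.len str1) 1).foldl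
      (fun n i => pvAcnt n (PySem.List.pyGetD s i ' ')) (-1)
  let st :=
    (PySem.List.pyRange 0 (PySem.Str.len str1) 1).foldl
      (fun st i => pvAstep num st (PySem.List.pyGetD s i ' ')) (0, [])
  String.ofList st.2

-- ===== PORT B =====
-- one pass over reversed(str1) with a 'seen_last_dot' flag, output reversed at the end
def pvBstep (st : List Char × Bool) (ch : Char) : List Char × Bool :=
  if ch = '.' ∧ st.2 = true then (st.1 ++ ['-'], st.2)
  else (st.1 ++ [ch], st.2 || decide (ch = '.'))

def replace_all_dots_except_extension_alt (str1 : String) : String :=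
  let st := (str1.toList.reverse).foldl pvBstep ([], false)
  String.ofList st.1.reverse

-- ===== PRECONDITION & SPEC =====
def Spec_replace_all_dots_except_extension (str1 : String) (out : String) : Prop := out = replace_all_dots_except_extension_alt str1
instance (str1 : String) (out : String) : Decidable (Spec_replace_all_dots_except_extension str1 out) := by unfold Spec_replace_all_dots_except_extension; infer_instance

-- ===== CLAIM (what is proved, stated in full; the proofs are below) =====
def Claim_equal_replace_all_dots_except_extension : Prop := ∀ (str1 : String), Dom_replace_all_dots_except_extension str1 → Spec_replace_all_dots_except_extension str1 (replace_all_dots_except_extension str1)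

-- ===== LEMMAS AND PROOFS =====

-- A's loop, abstracted: replace the first r dots (r may be ≤ 0: replace none)
def pvF : List Char → Int → List Char
  | [], _ => []
  | c :: t, r =>
    if c = '.' then (if 0 < r then '-' :: pvF t (r - 1) else '.' :: pvF t r)
    else c :: pvF t r

-- B's loop, abstracted: with the flag set, replace every dot; first dot sets the flag
def pvG : List Char → Bool → List Char
  | [], _ => []
  | c :: t, seen =>
    if c = '.' ∧ seen = true then '-' :: pvG t seen
    else c :: pvG t (seen || decide (c = '.'))

lemma pvA_count (l : List Char) (n : Int) :
    l.foldl (fun (n : Int) c => if c = '.' then n + 1 else n) n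
      = n + (l.countP (· == '.') : Int) := by
  induction l generalizing n with
  | nil => simp
  | cons c t ih =>
    by_cases h : c = '.' <;> simp [List.foldl_cons, h, ih] <;> try ring

lemma pvA_loop (l : List Char) (num : Int) (count : Int) (out : List Char) :
    (l.foldl (pvAstep num) (count, out)).2 = out ++ pvF l (num - count) := by
  induction l generalizing count out with
  | nil => simp [pvF]
  | cons c t ih =>
    by_cases hc : c = '.'
    · by_cases hlt : count < num
      · have h0 : 0 < num - count := by omega
        have : num - (count + 1) = num - count - 1 := by omega
        simp [List.foldl_cons, pvAstep, hc, hlt, ih, pvF, this]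
      · have h0 : ¬ 0 < num - count := by omega
        simp [List.foldl_cons, pvAstep, hc, hlt, ih, pvF]
    · simp [List.foldl_cons, pvAstep, hc, ih, pvF]

lemma pvB_loop (l : List Char) (seen : Bool) (out : List Char) :
    (l.foldl pvBstep (out, seen)).1 = out ++ pvG l seen := by
  induction l generalizing seen out with
  | nil => simp [pvG]
  | cons c t ih =>
    by_cases hc : c = '.'
    · cases seen <;> simp [List.foldl_cons, pvBstep, hc, ih, pvG]
    · cases seen <;> simp [List.foldl_cons, pvBstep, hc, ih, pvG]

lemma pvG_true (l : List Char) :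
    pvG l true = l.map (fun c => if c = '.' then '-' else c) := by
  induction l with
  | nil => simp [pvG]
  | cons c t ih => by_cases hc : c = '.' <;> simp [pvG, hc, ih]

lemma pvG_append_nodot (a b : List Char) (h : '.' ∉ a) :
    pvG (a ++ b) false = a ++ pvG b false := by
  induction a with
  | nil => simp
  | cons c t ih =>
    have hc : c ≠ '.' := fun hh => h (hh ▸ List.mem_cons_self)
    have ht : '.' ∉ t := fun hh => h (List.mem_cons_of_mem _ hh)
    simp [pvG, ih ht, fun hh : c = '.' => hc hh]

lemma pvF_nodot (l : List Char) (r : Int) (h : '.' ∉ l) : pvF l r = l := by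
  induction l generalizing r with
  | nil => simp [pvF]
  | cons c t ih =>
    have hc : c ≠ '.' := fun hh => h (hh ▸ List.mem_cons_self)
    have ht : '.' ∉ t := fun hh => h (List.mem_cons_of_mem _ hh)
    simp [pvF, hc, ih _ ht]

lemma pvF_append (p b : List Char) (r : Int) (hr : (p.countP (· == '.') : Int) ≤ r) :
    pvF (p ++ b) r
      = p.map (fun c => if c = '.' then '-' else c) ++ pvF b (r - (p.countP (· == '.') : Int)) := by
  induction p generalizing r with
  | nil => simp
  | cons c t ih =>
    by_cases hc : c = '.'
    · have hcnt : ((c :: t).countP (· == '.') : Int) = (t.countP (· == '.') : Int) + 1 := by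
        simp [hc]
      have h0 : 0 < r := by
        have : (0 : Int) ≤ (t.countP (· == '.') : Int) := by positivity
        omega
      have hr' : (t.countP (· == '.') : Int) ≤ r - 1 := by omega
      have harith : r - 1 - (t.countP (· == '.') : Int)
          = r - ((c :: t).countP (· == '.') : Int) := by rw [hcnt]; ring
      simp [pvF, hc, h0, ih _ hr', harith]
    · have hcnt : ((c :: t).countP (· == '.') : Int) = (t.countP (· == '.') : Int) := by
        simp [hc]
      have hr' : (t.countP (· == '.') : Int) ≤ r := by omega
      rw [hcnt]
      simp [pvF, hc, ih _ hr']

-- split a list at its LAST dot, or show it has none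
lemma pvSplit (l : List Char) :
    '.' ∉ l ∨ ∃ p t, l = p ++ '.' :: t ∧ '.' ∉ t := by
  induction l with
  | nil => exact Or.inl (by simp)
  | cons c rest ih =>
    rcases ih with hnone | ⟨p, t, heq, ht⟩
    · by_cases hc : c = '.'
      · exact Or.inr ⟨[], rest, by simp [hc], hnone⟩
      · refine Or.inl ?_
        intro h
        rcases List.mem_cons.1 h with h | h
        · exact hc h.symm
        · exact hnone h
    · exact Or.inr ⟨c :: p, t, by simp [heq], ht⟩

lemma pv_main (l : List Char) :
    (pvG l.reverse false).reverse = pvF l ((l.countP (· == '.') : Int) - 1) := by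
  rcases pvSplit l with hnone | ⟨p, t, heq, ht⟩
  · have hrev : '.' ∉ l.reverse := by simpa using hnone
    rw [show pvG l.reverse false = l.reverse ++ pvG [] false from by
          simpa using pvG_append_nodot l.reverse [] hrev]
    simp [pvG, pvF_nodot l _ hnone]
  · subst heq
    have ht0 : t.countP (· == '.') = 0 := by
      rw [List.countP_eq_zero]
      intro a ha
      simpa using fun hh : a = '.' => ht (hh ▸ ha)
    have hcnt : ((p ++ '.' :: t).countP (· == '.') : Int)
        = (p.countP (· == '.') : Int) + 1 := by
      simp [List.countP_append, ht0]
    have htrev : '.' ∉ t.reverse := by simpa using ht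
    have hGt : pvG ((p ++ '.' :: t).reverse) false
        = t.reverse ++ '.' :: pvG p.reverse true := by
      rw [show (p ++ '.' :: t).reverse = t.reverse ++ '.' :: p.reverse from by simp]
      rw [pvG_append_nodot _ _ htrev]
      simp [pvG]
    rw [hGt, hcnt]
    have harith : (p.countP (· == '.') : Int) + 1 - 1 - (p.countP (· == '.') : Int) = 0 := by ring
    rw [show (p.countP (· == '.') : Int) + 1 - 1 = (p.countP (· == '.') : Int) from by ring] at *
    rw [pvF_append p ('.' :: t) _ le_rfl]
    simp [pvG_true, pvF, pvF_nodot t _ ht]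

-- ===== VERDICT (by name: the statement is the Claim_ definition above) =====
theorem replace_all_dots_except_extension_spec : Claim_equal_replace_all_dots_except_extension := by
  intro str1 _
  unfold Spec_replace_all_dots_except_extension
  unfold replace_all_dots_except_extension replace_all_dots_except_extension_alt
  simp only [PySem.Str.len_eq]
  rw [PySem.List.foldl_pyRange_zero_pyGetD' str1.toList ' ' pvAcnt (-1 : Int)]
  rw [PySem.List.foldl_pyRange_zero_pyGetD' str1.toList ' '
        (pvAstep (str1.toList.foldl pvAcnt (-1))) ((0 : Int), ([] : List Char))]
  have hc : str1.toList.foldl pvAcnt (-1) = (str1.toList.countP (· == '.') : Int) - 1 := by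
    simpa [pvAcnt] using pvA_count str1.toList (-1)
  rw [pvA_loop, pvB_loop, hc]
  rw [show (str1.toList.countP (· == '.') : Int) - 1 - 0
        = (str1.toList.countP (· == '.') : Int) - 1 from by ring]
  rw [← pv_main str1.toList]
  simp
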